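-- pv_equiv track=rewrite | github.com/VIOLET50411/documentmanagement_agent | backend/app/ingestion/chunking/parent_child_splitter.py | _collapse_type
-- ===== SOURCE A (Python) =====
-- def _collapse_type(element_types: list[str]) -> str:
--     if any(item == "table" for item in element_types):
--         return "table"
--     if any(item == "heading" for item in element_types):
--         return "heading"
--     if any(item == "ocr_page" for item in element_types):
--         return "ocr_page"
--     return "text"
-- ===== SOURCE B (Python) =====
-- _RANK = {"table": 0, "heading": 1, "ocr_page": 2}
-- _NAMES = ["table", "heading", "ocr_page", "text"]
--
-- def _collapse_type(element_types: list[str]) -> str: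
--     best = 3
--     for t in element_types:
--         r = _RANK.get(t, 3)
--         if r < best:
--             best = r
--     return _NAMES[best]
-- ===== Notes on version B (the rewrite author's own statement) =====
-- stated objective: simpler
-- what changed: Replaces three short-circuit membership scans with one pass that keeps the minimum priority rank of any recognized type and maps it back through an ordered name table.
import Mathlib
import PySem

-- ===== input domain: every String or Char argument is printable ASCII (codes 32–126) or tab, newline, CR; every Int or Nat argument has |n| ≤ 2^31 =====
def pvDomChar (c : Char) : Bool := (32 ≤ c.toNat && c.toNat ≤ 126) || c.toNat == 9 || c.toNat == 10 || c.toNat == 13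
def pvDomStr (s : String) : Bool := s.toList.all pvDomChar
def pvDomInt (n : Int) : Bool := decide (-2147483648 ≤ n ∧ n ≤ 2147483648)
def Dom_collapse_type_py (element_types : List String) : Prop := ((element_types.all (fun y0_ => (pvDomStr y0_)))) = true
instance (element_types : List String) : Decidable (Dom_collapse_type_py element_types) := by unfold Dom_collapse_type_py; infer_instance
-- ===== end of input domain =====

-- B replaces A's three short-circuit scans by one min-rank pass over a priority table (simpler decomposition).


-- ===== PORT A =====
def collapse_type_py (element_types : List String) : String :=
  if element_types.any (fun item => item == "table") then "table"
  else if element_types.any (fun item => item == "heading") then "heading"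
  else if element_types.any (fun item => item == "ocr_page") then "ocr_page"
  else "text"

-- ===== PORT B =====
def pvRank : PySem.Dict String Nat :=
  (PySem.Dict.empty.insert "table" 0).insert "heading" 1 |>.insert "ocr_page" 2

def pvNames : List String := ["table", "heading", "ocr_page", "text"]

def collapse_type_py_alt (element_types : List String) : String :=
  let best := element_types.foldl (fun best t =>
    let r := pvRank.getD t 3
    if r < best then r else best) 3
  pvNames.getD best ""

-- ===== PRECONDITION & SPEC =====
def Spec_collapse_type_py (element_types : List String) (out : String) : Prop := out = collapse_type_py_alt element_types
instance (element_types : List String) (out : String) : Decidable (Spec_collapse_type_py element_types out) := by unfold Spec_collapse_type_py; infer_instance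

-- ===== CLAIM (what is proved, stated in full; the proofs are below) =====
def Claim_equal_collapse_type_py : Prop := ∀ (element_types : List String), Dom_collapse_type_py element_types → Spec_collapse_type_py element_types (collapse_type_py element_types)

-- ===== LEMMAS AND PROOFS =====

-- rank of A's answer, as a number
def pvARank (l : List String) : Nat :=
  if l.any (fun item => item == "table") then 0
  else if l.any (fun item => item == "heading") then 1
  else if l.any (fun item => item == "ocr_page") then 2
  else 3

theorem pvARank_le (l : List String) : pvARank l ≤ 3 := by
  unfold pvARank; split_ifs <;> omega

theorem getD_rank (t : String) :
    pvRank.getD t 3 =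
      (if t == "table" then 0 else if t == "heading" then 1 else if t == "ocr_page" then 2 else 3) := by
  have hmk : pvRank = PySem.Dict.mk [("table", 0), ("heading", 1), ("ocr_page", 2)] := by rfl
  rw [hmk]
  simp only [PySem.Dict.getD, PySem.Dict.get?_mk_cons]
  by_cases ht : t = "table"
  · simp [ht]
  · by_cases hh : t = "heading"
    · simp [hh]
    · by_cases ho : t = "ocr_page"
      · simp [ho]
      · have h1 : ("table" == t) = false := by simp; exact fun h => ht h.symm
        have h2 : ("heading" == t) = false := by simp; exact fun h => hh h.symm
        have h3 : ("ocr_page" == t) = false := by simp; exact fun h => ho h.symm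
        simp [h1, h2, h3, PySem.Dict.get?, beq_iff_eq, ht, hh, ho]

theorem pvARank_cons (t : String) (l : List String) :
    pvARank (t :: l) = min (pvRank.getD t 3) (pvARank l) := by
  rw [getD_rank]
  by_cases ht : t = "table"
  · subst ht; simp [pvARank]
  by_cases hh : t = "heading"
  · subst hh; simp [pvARank]
    split_ifs <;> omega
  by_cases ho : t = "ocr_page"
  · subst ho; simp [pvARank]
    split_ifs <;> omega
  · simp [pvARank, ht, hh, ho]
    split_ifs <;> omega

theorem getD_rank_le (t : String) : pvRank.getD t 3 ≤ 3 := by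
  rw [getD_rank]; split_ifs <;> omega

theorem fold_eq_min_aRank (l : List String) (b : Nat) (hb : b ≤ 3) :
    l.foldl (fun best t => let r := pvRank.getD t 3; if r < best then r else best) b
      = min b (pvARank l) := by
  induction l generalizing b with
  | nil => simp [pvARank]; omega
  | cons t l ih =>
    have hacc : (let r := pvRank.getD t 3; if r < b then r else b) = min b (pvRank.getD t 3) := by
      simp only []; split_ifs <;> omega
    rw [List.foldl_cons, hacc, ih _ (by have := getD_rank_le t; omega), pvARank_cons]
    omega

-- ===== VERDICT (by name: the statement is the Claim_ definition above) =====
theorem collapse_type_py_spec : Claim_equal_collapse_type_py := by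
  intro l _
  unfold Spec_collapse_type_py collapse_type_py_alt collapse_type_py
  rw [fold_eq_min_aRank _ _ (by omega)]
  have h3 := pvARank_le l
  have hmin : min 3 (pvARank l) = pvARank l := by omega
  rw [hmin]
  unfold pvARank
  split_ifs <;> simp [pvNames]
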